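-- pv_equiv track=rewrite | github.com/teymurrzayev/python-naa | exam/calculate_typing_time.py | calculate_typing_time
-- ===== SOURCE A (Python) =====
-- def calculate_typing_time(keyboard: str, word: str) -> int:
--     char_positions = {char: idx for idx, char in enumerate(keyboard)}
--
--     total_time = 0
--     current_pos = 0
--
--     for char in word:
--         target_pos = char_positions[char]
--         total_time += abs(target_pos - current_pos)
--         current_pos = target_pos
--
--     return total_time
-- ===== SOURCE B (Python) =====
-- def calculate_typing_time(keyboard: str, word: str) -> int:
--     char_positions = {char: idx for idx, char in enumerate(keyboard)}
--     # One counter per gap between adjacent key slots; each move from a to b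
--     # crosses exactly the gaps min(a,b) .. max(a,b)-1, and the total movement
--     # is the total number of gap crossings.
--     crossings = [0] * (len(keyboard) - 1)
--     prev = 0
--     for char in word:
--         pos = char_positions[char]
--         for gap in range(min(prev, pos), max(prev, pos)):
--             crossings[gap] += 1
--         prev = pos
--     return sum(crossings)
-- ===== Notes on version B (the rewrite author's own statement) =====
-- stated objective: alternative
-- what changed: Instead of accumulating a running distance total, B maintains a crossing-count array with one counter per gap between adjacent key slots: each move increments every gap it crosses (|b-a| = number of unit gaps crossed), and the answer is the sum of the array; same return value, different maintained state and cost model.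
import Mathlib
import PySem

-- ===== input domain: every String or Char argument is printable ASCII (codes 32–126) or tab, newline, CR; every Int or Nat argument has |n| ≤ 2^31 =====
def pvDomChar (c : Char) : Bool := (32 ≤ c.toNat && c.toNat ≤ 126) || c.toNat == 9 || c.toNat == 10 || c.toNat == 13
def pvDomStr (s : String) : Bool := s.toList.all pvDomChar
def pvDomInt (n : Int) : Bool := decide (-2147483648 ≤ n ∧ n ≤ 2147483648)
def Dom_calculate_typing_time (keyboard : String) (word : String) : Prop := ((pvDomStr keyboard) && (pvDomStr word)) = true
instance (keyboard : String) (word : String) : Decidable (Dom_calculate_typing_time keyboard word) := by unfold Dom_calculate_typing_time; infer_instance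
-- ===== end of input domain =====

-- B replaces the running distance total with a per-gap crossing-count array summed at the end; return-value equivalence.

-- ===== PORT A =====
-- shared comprehension from both sources: {char: idx for idx, char in enumerate(keyboard)}
def pvCharIdx (keyboard : String) : PySem.Dict Char Int :=
  (PySem.List.enumerate keyboard.toList).foldl (fun d p => d.insert p.2 p.1) PySem.Dict.empty

def calculate_typing_time (keyboard : String) (word : String) : Int :=
  let char_positions := pvCharIdx keyboard
  -- getD 0 totalizes char_positions[char]: Python raises KeyError there; Pre_ excludes those inputs
  (word.toList.foldl (fun s c =>
      let target_pos := char_positions.getD c 0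
      (s.1 + |target_pos - s.2|, target_pos)) ((0 : Int), (0 : Int))).1

-- ===== PORT B =====
def calculate_typing_time_alt (keyboard : String) (word : String) : Int :=
  let char_positions := pvCharIdx keyboard
  -- crossings = [0] * (len(keyboard) - 1)  (Python's negative repeat gives [], as does Nat subtraction)
  let crossings0 : List Int := List.replicate (keyboard.toList.length - 1) 0
  -- state = (crossings, prev); crossings[gap] += 1 ported with pyGetD/pySetD — exact here, since
  -- every gap produced by range(min(prev,pos), max(prev,pos)) is a valid index of crossings
  let final := word.toList.foldl (fun (s : List Int × Int) c =>
      let pos := char_positions.getD c 0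
      let cs := (PySem.List.pyRange (min s.2 pos) (max s.2 pos) 1).foldl
          (fun l g => PySem.List.pySetD l g (PySem.List.pyGetD l g 0 + 1)) s.1
      (cs, pos)) (crossings0, (0 : Int))
  final.1.sum

-- ===== PRECONDITION & SPEC =====
-- Pre_ excludes exactly the inputs where A raises KeyError: a word character absent from the keyboard.
def Pre_calculate_typing_time (keyboard : String) (word : String) : Prop :=
  (word.toList.all (fun c => keyboard.toList.contains c)) = true
instance (keyboard : String) (word : String) : Decidable (Pre_calculate_typing_time keyboard word) := by unfold Pre_calculate_typing_time; infer_instance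
def pvWitness_calculate_typing_time : String × String := ("abc", "cab")

def Spec_calculate_typing_time (keyboard : String) (word : String) (out : Int) : Prop := out = calculate_typing_time_alt keyboard word
instance (keyboard : String) (word : String) (out : Int) : Decidable (Spec_calculate_typing_time keyboard word out) := by unfold Spec_calculate_typing_time; infer_instance

-- ===== CLAIM (what is proved, stated in full; the proofs are below) =====
def Claim_equal_calculate_typing_time : Prop := ∀ (keyboard : String) (word : String), Dom_calculate_typing_time keyboard word → Pre_calculate_typing_time keyboard word → Spec_calculate_typing_time keyboard word (calculate_typing_time keyboard word)

-- ===== LEMMAS AND PROOFS =====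

-- Every value of the char→index dict (and the default 0) lies in [0, len(keyboard) - 1].
theorem pv_fold_insert_bound (P : Int → Prop) (l : List (Int × Char)) :
    ∀ (d : PySem.Dict Char Int), (∀ c, P (d.getD c 0)) → (∀ p ∈ l, P p.1) →
    ∀ c, P ((l.foldl (fun d p => d.insert p.2 p.1) d).getD c 0) := by
  induction l with
  | nil => intro d hd _ c; exact hd c
  | cons p rest ih =>
    intro d hd hl c
    refine ih (d.insert p.2 p.1) (fun c' => ?_) (fun q hq => hl q (List.mem_cons_of_mem _ hq)) c
    rw [PySem.Dict.getD_insert]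
    split_ifs
    · exact hl p (List.mem_cons_self)
    · exact hd c'

theorem pv_dict_val_bound (keyboard : String) (c : Char) :
    0 ≤ (pvCharIdx keyboard).getD c 0 ∧
      (pvCharIdx keyboard).getD c 0 ≤ ((keyboard.toList.length - 1 : Nat) : Int) := by
  unfold pvCharIdx
  refine pv_fold_insert_bound
    (fun v => 0 ≤ v ∧ v ≤ ((keyboard.toList.length - 1 : Nat) : Int)) _ _
    (fun c' => by simp [pysem]) (fun p hp => ?_) c
  rcases (PySem.List.mem_enumerate_iff _ _ _).1 hp with ⟨k, hk, rfl⟩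
  dsimp only
  omega

-- Incrementing every cell of cs with index in [a, b) adds b - a to the sum and keeps the length.
theorem pv_inc_nat (k : Nat) : ∀ (a : Int) (cs : List Int), 0 ≤ a →
    a + k ≤ (cs.length : Int) →
    ((PySem.List.pyRange a (a + k) 1).foldl
        (fun l g => PySem.List.pySetD l g (PySem.List.pyGetD l g 0 + 1)) cs).sum
      = cs.sum + k ∧
    ((PySem.List.pyRange a (a + k) 1).foldl
        (fun l g => PySem.List.pySetD l g (PySem.List.pyGetD l g 0 + 1)) cs).length
      = cs.length := by
  induction k with
  | zero => intro a cs _ _; rw [PySem.List.pyRange_one_eq_nil (by omega)]; simp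
  | succ k ih =>
    intro a cs ha hb
    rw [PySem.List.pyRange_one_cons (by omega)]
    simp only [List.foldl_cons]
    rw [PySem.List.pySetD_of_nonneg _ _ ha, PySem.List.pyGetD_eq_getElem _ _ ha (by omega)]
    have hlt : a.toNat < cs.length := by omega
    have hset : (cs.set a.toNat (cs[a.toNat] + 1)).sum = cs.sum + 1 := by
      rw [List.sum_set']
      simp [hlt]
    have hlen : (cs.set a.toNat (cs[a.toNat] + 1)).length = cs.length :=
      List.length_set ..
    have := ih (a + 1) (cs.set a.toNat (cs[a.toNat] + 1)) (by omega) (by rw [hlen]; omega)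
    have harg : a + 1 + (k : Int) = a + ((k : Nat) + 1 : Nat) := by push_cast; ring
    rw [harg] at this
    rw [this.1, this.2, hset, hlen]
    constructor
    · push_cast; ring
    · rfl

theorem pv_inc_range (cs : List Int) (a b : Int) (ha : 0 ≤ a) (hab : a ≤ b)
    (hb : b ≤ (cs.length : Int)) :
    ((PySem.List.pyRange a b 1).foldl
        (fun l g => PySem.List.pySetD l g (PySem.List.pyGetD l g 0 + 1)) cs).sum
      = cs.sum + (b - a) ∧
    ((PySem.List.pyRange a b 1).foldl
        (fun l g => PySem.List.pySetD l g (PySem.List.pyGetD l g 0 + 1)) cs).length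
      = cs.length := by
  have hba : b = a + ((b - a).toNat : Int) := by omega
  rw [hba]
  have := pv_inc_nat (b - a).toNat a cs ha (by omega)
  exact ⟨by rw [this.1]; omega, this.2⟩

-- A's accumulator fold shifted by its initial total.
theorem pv_A_shift (f : Char → Int) (ws : List Char) (t cur : Int) :
    (ws.foldl (fun s c => (s.1 + |f c - s.2|, f c)) (t, cur)).1
      = t + (ws.foldl (fun s c => (s.1 + |f c - s.2|, f c)) ((0 : Int), cur)).1 := by
  induction ws generalizing t cur with
  | nil => simp
  | cons c rest ih =>
    simp only [List.foldl_cons]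
    rw [ih, ih (t := 0 + |f c - cur|)]
    ring

-- Main invariant: B's crossing array accumulates exactly A's running total.
theorem pv_main (f : Char → Int) (n : Nat)
    (hf : ∀ c, 0 ≤ f c ∧ f c ≤ (n : Int)) (ws : List Char) :
    ∀ (cs : List Int) (prev : Int), cs.length = n → 0 ≤ prev → prev ≤ (n : Int) →
    ((ws.foldl (fun (s : List Int × Int) c =>
        (((PySem.List.pyRange (min s.2 (f c)) (max s.2 (f c)) 1).foldl
            (fun l g => PySem.List.pySetD l g (PySem.List.pyGetD l g 0 + 1)) s.1),
          f c)) (cs, prev)).1).sum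
      = cs.sum + (ws.foldl (fun s c => (s.1 + |f c - s.2|, f c)) ((0 : Int), prev)).1 := by
  induction ws with
  | nil => intro cs prev _ _ _; simp
  | cons c rest ih =>
    intro cs prev hlen hp0 hpn
    have hfc := hf c
    have hinc := pv_inc_range cs (min prev (f c)) (max prev (f c))
      (le_min hp0 hfc.1) (min_le_max) (by rw [hlen]; exact max_le hpn hfc.2)
    simp only [List.foldl_cons]
    rw [ih _ (f c) (by rw [hinc.2, hlen]) hfc.1 hfc.2, hinc.1,
      pv_A_shift f rest (0 + |f c - prev|) (f c), max_sub_min_eq_abs' prev (f c), abs_sub_comm prev (f c)]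
    ring

-- ===== VERDICT (by name: the statement is the Claim_ definition above) =====
theorem calculate_typing_time_spec : Claim_equal_calculate_typing_time := by
  intro keyboard word _ _
  unfold Spec_calculate_typing_time calculate_typing_time calculate_typing_time_alt
  rw [pv_main (fun c => (pvCharIdx keyboard).getD c 0) (keyboard.toList.length - 1)
      (fun c => pv_dict_val_bound keyboard c) word.toList
      (List.replicate (keyboard.toList.length - 1) 0) 0
      (List.length_replicate) le_rfl (Int.natCast_nonneg _)]
  simp
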